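-- pv_equiv track=rewrite | github.com/Riverscapes/RaveAddIn | RaveAddIn/ConversionScripts/Convert_RCAT.py | search_for_key
-- ===== SOURCE A (Python) =====
-- def search_for_key(all_files, keys, excludes=[]):
--
--     stripped_files = []
--     for file in all_files:
--         stripped_files.append(file.split("\\")[-1])
--
--     for key in keys:
--
--         to_return = [s for s in stripped_files if key in s]
--
--         for exclude in excludes:
--             bad_list = [s for s in stripped_files if exclude in s]
--             for bad_item in bad_list:
--                 while bad_item in to_return:
--                     to_return.remove(bad_item)
--
--         if len(to_return) > 0:
--             return all_files[stripped_files.index(to_return[0])]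
--
--     return "COULD NOT FIND {}".format(keys)
-- ===== SOURCE B (Python) =====
-- def search_for_key(all_files, keys, excludes=[]):
--     # Single sweep over files: keep the smallest key index matched so far and the
--     # file that first matched it; later files only probe key indices below the bound.
--     best_i = len(keys)
--     best_f = None
--     for f in all_files:
--         base = f.split("\\")[-1]
--         if any(e in base for e in excludes):
--             continue
--         for i in range(best_i):
--             if keys[i] in base:
--                 best_i = i
--                 best_f = f
--                 break
--     if best_f is not None:
--         return best_f
--     return "COULD NOT FIND {}".format(keys)
-- ===== Notes on version B (the rewrite author's own statement) =====
-- stated objective: faster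
-- what changed: Replaces A's key-outer passes that rebuild a candidate basename list per key (with repeated quadratic list removals and an index lookup back into the file list) by a single file-outer sweep that keeps the smallest key index matched so far and the file that first matched it.
import Mathlib
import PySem

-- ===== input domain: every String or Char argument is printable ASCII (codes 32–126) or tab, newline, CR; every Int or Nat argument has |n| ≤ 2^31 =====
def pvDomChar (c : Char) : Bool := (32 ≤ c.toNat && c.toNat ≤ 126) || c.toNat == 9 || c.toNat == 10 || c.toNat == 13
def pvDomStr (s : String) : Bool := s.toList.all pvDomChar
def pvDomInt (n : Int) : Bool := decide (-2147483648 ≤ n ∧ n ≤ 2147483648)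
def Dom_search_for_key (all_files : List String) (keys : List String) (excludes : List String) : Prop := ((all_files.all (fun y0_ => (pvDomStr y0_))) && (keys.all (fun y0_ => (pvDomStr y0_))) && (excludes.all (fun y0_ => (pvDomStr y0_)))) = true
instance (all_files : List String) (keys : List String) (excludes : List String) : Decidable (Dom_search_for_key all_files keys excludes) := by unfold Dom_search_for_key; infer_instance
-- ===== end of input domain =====

-- B replaces A's per-key candidate-list building (with repeated removal and an index lookup back
-- into the file list) by one sweep over the files maintaining the best key index matched so far;
-- objective: faster (one pass instead of per-key list rebuilding; measured faster in a timing run).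

-- ===== shared helpers (both Pythons compute file.split("\\")[-1] and the same failure message) =====
-- file.split("\\")[-1]; the separator is nonempty so split? = some and the pieces are nonempty, so [-1] never raises
def pyBasename (f : String) : String :=
  (PySem.List.pyGet? ((PySem.Str.split? f "\\").getD [f]) (-1)).getD ""

-- repr(s) as CPython prints it for strings of the admitted domain (printable ASCII + tab/newline/CR)
def pyReprStr (s : String) : String :=
  let cs := s.toList
  let q : Char := if cs.contains '\'' && !(cs.contains '"') then '"' else '\''
  String.ofList ([q] ++ cs.flatMap (fun c =>
    if c = '\\' then ['\\', '\\']
    else if c = q then ['\\', q]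
    else if c = '\t' then ['\\', 't']
    else if c = '\n' then ['\\', 'n']
    else if c = '\r' then ['\\', 'r']
    else [c]) ++ [q])

-- "COULD NOT FIND {}".format(keys): str() of a Python list of strings
def pyKeysMsg (keys : List String) : String :=
  "COULD NOT FIND " ++ "[" ++ PySem.Str.join ", " (keys.map pyReprStr) ++ "]"

-- ===== PORT A =====
-- 'while bad_item in to_return: to_return.remove(bad_item)' (remove = erase first occurrence)
def pyRemoveAll (tr : List String) (bad : String) : List String :=
  if h : bad ∈ tr then pyRemoveAll (tr.erase bad) bad else tr
termination_by tr.length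
decreasing_by
  have h1 := List.length_erase_of_mem h
  have h2 := List.length_pos_of_mem h
  omega

-- the 'for key in keys' loop of A (early return on a non-empty to_return)
def searchLoopA (all_files stripped_files excludes keys : List String) : List String → String
  | [] => pyKeysMsg keys
  | key :: rest =>
    let tr0 := stripped_files.filter (fun s => PySem.Str.isIn key s)
    let tr := excludes.foldl (fun tr exclude =>
        (stripped_files.filter (fun s => PySem.Str.isIn exclude s)).foldl pyRemoveAll tr) tr0
    if tr.length > 0 then
      -- all_files[stripped_files.index(to_return[0])]; the index is always found and in range
      -- because to_return's elements come from stripped_files (same length as all_files)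
      match PySem.List.index? stripped_files ((PySem.List.pyGet? tr 0).getD "") with
      | some i => (PySem.List.pyGet? all_files (i : Int)).getD ""
      | none => ""
    else searchLoopA all_files stripped_files excludes keys rest

def search_for_key (all_files : List String) (keys : List String) (excludes : List String) : String :=
  let stripped_files := all_files.foldl (fun acc file => acc ++ [pyBasename file]) []
  searchLoopA all_files stripped_files excludes keys keys

-- ===== PORT B =====
def search_for_key_alt (all_files : List String) (keys : List String) (excludes : List String) : String :=
  let st := all_files.foldl (fun (st : Nat × Option String) f =>
      let base := pyBasename f
      if excludes.any (fun e => PySem.Str.isIn e base) then st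
      else
        -- 'for i in range(best_i): if keys[i] in base: … break' (i < best_i ≤ len(keys), so keys[i] never raises)
        match (List.range st.1).find? (fun i => PySem.Str.isIn (keys.getD i "") base) with
        | some i => (i, some f)
        | none => st)
    (keys.length, (none : Option String))
  match st.2 with
  | some f => f
  | none => pyKeysMsg keys

-- ===== PRECONDITION & SPEC =====
def Spec_search_for_key (all_files : List String) (keys : List String) (excludes : List String) (out : String) : Prop := out = search_for_key_alt all_files keys excludes
instance (all_files : List String) (keys : List String) (excludes : List String) (out : String) : Decidable (Spec_search_for_key all_files keys excludes out) := by unfold Spec_search_for_key; infer_instance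

-- ===== CLAIM (what is proved, stated in full; the proofs are below) =====
def Claim_equal_search_for_key : Prop := ∀ (all_files : List String) (keys : List String) (excludes : List String), Dom_search_for_key all_files keys excludes → Spec_search_for_key all_files keys excludes (search_for_key all_files keys excludes)

-- ===== LEMMAS AND PROOFS =====

-- the common reference form: first key (in order) that some non-excluded file's basename contains;
-- result = the first such file
def refGo (files excludes keys0 : List String) : List String → String
  | [] => pyKeysMsg keys0
  | k :: rest =>
    match files.find? (fun f => PySem.Str.isIn k (pyBasename f) &&
        excludes.all (fun e => !PySem.Str.isIn e (pyBasename f))) with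
    | some f => f
    | none => refGo files excludes keys0 rest

theorem filter_erase_self (tr : List String) (bad : String) :
    (tr.erase bad).filter (fun x => x != bad) = tr.filter (fun x => x != bad) := by
  induction tr with
  | nil => simp
  | cons x xs ih =>
    by_cases hx : x = bad
    · subst hx; simp [List.erase_cons_head]
    · rw [List.erase_cons_tail (by simpa using hx)]
      simp [hx, ih]

theorem pyRemoveAll_eq_filter (tr : List String) (bad : String) :
    pyRemoveAll tr bad = tr.filter (fun x => x != bad) := by
  rw [pyRemoveAll]
  split
  · next h =>
    rw [pyRemoveAll_eq_filter (tr.erase bad) bad, filter_erase_self]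
  · next h =>
    symm
    rw [List.filter_eq_self]
    intro x hx
    simp only [bne_iff_ne, ne_eq]
    rintro rfl; exact h hx
termination_by tr.length
decreasing_by
  next h =>
  have h1 := List.length_erase_of_mem h
  have h2 := List.length_pos_of_mem h
  omega

theorem foldl_pyRemoveAll (bl : List String) (tr : List String) :
    bl.foldl pyRemoveAll tr = tr.filter (fun t => !bl.contains t) := by
  induction bl generalizing tr with
  | nil => simp
  | cons b bs ih =>
    rw [List.foldl_cons, ih, pyRemoveAll_eq_filter, List.filter_filter]
    congr 1
    funext t
    simp [Bool.and_comm, bne, BEq.beq]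

theorem contains_filter_eq (stripped : List String) (r : String → Bool) (s : String) (hs : s ∈ stripped) :
    (stripped.filter r).contains s = r s := by
  by_cases h : r s = true
  · simp [List.mem_filter, hs, h]
  · simp only [Bool.not_eq_true] at h
    simp [List.mem_filter, h]

theorem exclFold (stripped : List String) (exs : List String) (p : String → Bool) :
    exs.foldl (fun tr ex => (stripped.filter (fun s => PySem.Str.isIn ex s)).foldl pyRemoveAll tr)
        (stripped.filter p)
      = stripped.filter (fun s => p s && exs.all (fun e => !PySem.Str.isIn e s)) := by
  induction exs generalizing p with
  | nil => simp
  | cons ex exs ih =>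
    rw [List.foldl_cons, foldl_pyRemoveAll, List.filter_filter]
    have heq : stripped.filter (fun a => !(stripped.filter (fun s => PySem.Str.isIn ex s)).contains a && p a)
        = stripped.filter (fun a => !PySem.Str.isIn ex a && p a) := by
      apply List.filter_congr
      intro t ht
      rw [contains_filter_eq _ _ _ ht]
    rw [heq, ih]
    apply List.filter_congr
    intro t _
    simp only [List.all_cons]
    cases p t <;> cases PySem.Str.isIn ex t <;> cases exs.all (fun e => !PySem.Str.isIn e t) <;> rfl

theorem filter_map_nil_iff (g : String → String) (q : String → Bool) (files : List String) :
    (files.map g).filter q = [] ↔ files.find? (fun f => q (g f)) = none := by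
  simp [List.filter_eq_nil_iff, List.find?_eq_none]

theorem filter_map_cons (g : String → String) (q : String → Bool) (files : List String)
    (b : String) (l : List String) (h : (files.map g).filter q = b :: l) :
    ∃ i f, PySem.List.index? (files.map g) b = some i ∧
      PySem.List.pyGet? files (i : Int) = some f ∧
      files.find? (fun f => q (g f)) = some f := by
  induction files generalizing b l with
  | nil => simp at h
  | cons f fs ih =>
    simp only [List.map_cons, List.filter_cons] at h
    by_cases hq : q (g f) = true
    · rw [if_pos hq] at h
      obtain ⟨rfl, rfl⟩ : g f = b ∧ (fs.map g).filter q = l :=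
        ⟨(List.cons.injEq _ _ _ _ ▸ h).1, (List.cons.injEq _ _ _ _ ▸ h).2⟩
      refine ⟨0, f, ?_, ?_, ?_⟩
      · exact PySem.List.index?_cons_self _ _
      · show PySem.List.pyGet? (f :: fs) ((0 : Nat) : Int) = some f
        rw [PySem.List.pyGet?_natCast]; rfl
      · exact List.find?_cons_of_pos hq
    · rw [if_neg hq] at h
      have hqb : q b = true := by
        have : b ∈ (fs.map g).filter q := h ▸ List.mem_cons_self ..
        exact (List.mem_filter.mp this).2
      have hne : g f ≠ b := fun he => hq (he ▸ hqb)
      obtain ⟨i, f', h1, h2, h3⟩ := ih b l h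
      refine ⟨i + 1, f', ?_, ?_, ?_⟩
      · rw [List.map_cons, PySem.List.index?_cons_of_ne _ hne, h1]; rfl
      · show PySem.List.pyGet? (f :: fs) (((i : Nat) + 1 : Nat) : Int) = some f'
        rw [PySem.List.pyGet?_natCast] at h2 ⊢
        simpa using h2
      · rw [List.find?_cons_of_neg (by simp [hq])]; exact h3

theorem searchLoopA_eq_refGo (files excludes keys : List String) (rest : List String) :
    searchLoopA files (files.map pyBasename) excludes keys rest = refGo files excludes keys rest := by
  induction rest with
  | nil => rfl
  | cons key rest ih =>
    have hex := exclFold (files.map pyBasename) excludes (fun s => PySem.Str.isIn key s)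
    rw [searchLoopA, refGo]
    simp only [hex]
    cases hq : (files.map pyBasename).filter
        (fun s => PySem.Str.isIn key s && excludes.all (fun e => !PySem.Str.isIn e s)) with
    | nil =>
      have hnone : files.find? (fun f => PySem.Str.isIn key (pyBasename f) &&
          excludes.all (fun e => !PySem.Str.isIn e (pyBasename f))) = none :=
        (filter_map_nil_iff pyBasename _ files).mp hq
      rw [hnone]
      simpa using ih
    | cons b l =>
      obtain ⟨i, f, h1, h2, h3⟩ := filter_map_cons pyBasename _ files b l hq
      have h3' : files.find? (fun f => PySem.Str.isIn key (pyBasename f) &&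
          excludes.all (fun e => !PySem.Str.isIn e (pyBasename f))) = some f := h3
      rw [h3']
      simp only [List.length_cons, if_pos (Nat.succ_pos _)]
      have h0 : (PySem.List.pyGet? (b :: l) (0 : Int)).getD "" = b := by
        rw [show (0 : Int) = ((0 : Nat) : Int) from rfl, PySem.List.pyGet?_natCast]
        rfl
      rw [h0, h1]
      show (PySem.List.pyGet? files (i : Int)).getD "" = f
      rw [h2]; rfl

-- B-side invariant
def InvB (keys excludes : List String) (P : List String) (st : Nat × Option String) : Prop :=
  st.1 ≤ keys.length ∧
  (∀ i, i < st.1 → P.find? (fun f => PySem.Str.isIn (keys.getD i "") (pyBasename f) &&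
      excludes.all (fun e => !PySem.Str.isIn e (pyBasename f))) = none) ∧
  (match st.2 with
   | some f => st.1 < keys.length ∧
       P.find? (fun f => PySem.Str.isIn (keys.getD st.1 "") (pyBasename f) &&
         excludes.all (fun e => !PySem.Str.isIn e (pyBasename f))) = some f
   | none => st.1 = keys.length)

theorem find?_range_eq_some {p : Nat → Bool} {n i : Nat}
    (h : (List.range n).find? p = some i) :
    p i = true ∧ i < n ∧ ∀ j, j < i → p j = false := by
  induction n generalizing p i with
  | zero => simp at h
  | succ n ihn =>
    rw [List.range_succ_eq_map] at h
    by_cases hp : p 0 = true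
    · rw [show (0 :: (List.range n).map (· + 1)).find? p = some 0 from List.find?_cons_of_pos hp] at h
      obtain rfl : i = 0 := by simpa using h.symm
      exact ⟨hp, Nat.succ_pos _, by omega⟩
    · rw [List.find?_cons_of_neg (by simp [hp]), List.find?_map] at h
      obtain ⟨i', hi', rfl⟩ : ∃ i', (List.range n).find? (p ∘ (· + 1)) = some i' ∧ i = i' + 1 := by
        cases he : (List.range n).find? (p ∘ (· + 1)) with
        | none => rw [he] at h; simp at h
        | some v => rw [he] at h; exact ⟨v, rfl, by simpa using h.symm⟩
      obtain ⟨ha, hb, hc⟩ := ihn hi'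
      refine ⟨ha, by omega, ?_⟩
      intro j hj
      cases j with
      | zero => simpa using hp
      | succ j' => exact hc j' (by omega)

theorem find?_range_eq_none {p : Nat → Bool} {n : Nat}
    (h : (List.range n).find? p = none) : ∀ j, j < n → p j = false := by
  intro j hj
  have := List.find?_eq_none.mp h j (List.mem_range.mpr hj)
  simpa using this

theorem InvB_step (keys excludes : List String) (P : List String) (st : Nat × Option String)
    (f : String) (h : InvB keys excludes P st) :
    InvB keys excludes (P ++ [f])
      ((fun (st : Nat × Option String) f =>
        let base := pyBasename f
        if excludes.any (fun e => PySem.Str.isIn e base) then st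
        else
          match (List.range st.1).find? (fun i => PySem.Str.isIn (keys.getD i "") base) with
          | some i => (i, some f)
          | none => st) st f) := by
  obtain ⟨bi, bo⟩ := st
  obtain ⟨h1, h2, h3⟩ := h
  simp only at h1 h2 h3 ⊢
  by_cases hany : excludes.any (fun e => PySem.Str.isIn e (pyBasename f)) = true
  · rw [if_pos hany]
    have hnotgood : excludes.all (fun e => !PySem.Str.isIn e (pyBasename f)) = false := by
      simp only [List.any_eq_true] at hany
      obtain ⟨e, he, hin⟩ := hany
      exact List.all_eq_false.mpr ⟨e, he, by simpa using hin⟩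
    refine ⟨h1, ?_, ?_⟩
    · intro i hi
      have hpf : (PySem.Str.isIn (keys.getD i "") (pyBasename f) &&
          excludes.all (fun e => !PySem.Str.isIn e (pyBasename f))) = false := by
        rw [hnotgood, Bool.and_false]
      rw [List.find?_append, h2 i hi, Option.none_or, List.find?_cons, hpf, List.find?_nil]
    · cases bo with
      | none => exact h3
      | some g => exact ⟨h3.1, by rw [List.find?_append, h3.2]; rfl⟩
  · rw [if_neg hany]
    have hall : excludes.all (fun e => !PySem.Str.isIn e (pyBasename f)) = true := by
      simp only [Bool.not_eq_true, List.any_eq_false] at hany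
      exact List.all_eq_true.mpr fun e he => by simpa using hany e he
    cases hr : (List.range bi).find? (fun i => PySem.Str.isIn (keys.getD i "") (pyBasename f)) with
    | some i =>
      show InvB keys excludes (P ++ [f]) (i, some f)
      obtain ⟨hpi, hilt, hmin⟩ := find?_range_eq_some hr
      refine ⟨by omega, ?_, ?_⟩
      · intro j hj
        have hpf : (PySem.Str.isIn (keys.getD j "") (pyBasename f) &&
            excludes.all (fun e => !PySem.Str.isIn e (pyBasename f))) = false := by
          rw [hmin j hj, Bool.false_and]
        rw [List.find?_append, h2 j (by omega), Option.none_or, List.find?_cons, hpf, List.find?_nil]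
      · refine ⟨by omega, ?_⟩
        have hpf : (PySem.Str.isIn (keys.getD i "") (pyBasename f) &&
            excludes.all (fun e => !PySem.Str.isIn e (pyBasename f))) = true := by
          rw [hpi, hall, Bool.and_self]
        rw [List.find?_append, h2 i (by omega), Option.none_or, List.find?_cons, hpf]
    | none =>
      show InvB keys excludes (P ++ [f]) (bi, bo)
      have hnone := find?_range_eq_none hr
      refine ⟨h1, ?_, ?_⟩
      · intro j hj
        have hpf : (PySem.Str.isIn (keys.getD j "") (pyBasename f) &&
            excludes.all (fun e => !PySem.Str.isIn e (pyBasename f))) = false := by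
          rw [hnone j hj, Bool.false_and]
        rw [List.find?_append, h2 j hj, Option.none_or, List.find?_cons, hpf, List.find?_nil]
      · cases bo with
        | none => exact h3
        | some g => exact ⟨h3.1, by rw [List.find?_append, h3.2]; rfl⟩

theorem InvB_foldl (keys excludes : List String) (files : List String) :
    ∀ (P : List String) (st : Nat × Option String), InvB keys excludes P st →
    InvB keys excludes (P ++ files)
      (files.foldl (fun (st : Nat × Option String) f =>
        let base := pyBasename f
        if excludes.any (fun e => PySem.Str.isIn e base) then st
        else
          match (List.range st.1).find? (fun i => PySem.Str.isIn (keys.getD i "") base) with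
          | some i => (i, some f)
          | none => st) st) := by
  induction files with
  | nil => intro P st h; simpa using h
  | cons f fs ih =>
    intro P st h
    have h1 := InvB_step keys excludes P st f h
    have h2 := ih (P ++ [f]) _ h1
    simpa [List.append_assoc] using h2

theorem refGo_of_inv (files excludes keys : List String) (st : Nat × Option String)
    (h : InvB keys excludes files st) :
    ∀ j, j ≤ st.1 → refGo files excludes keys (keys.drop j)
      = (match st.2 with | some f => f | none => pyKeysMsg keys) := by
  obtain ⟨bi, bo⟩ := st
  obtain ⟨h1, h2, h3⟩ := h
  simp only at h1 h2 h3 ⊢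
  have hskip : ∀ d j, j ≤ bi → bi - j = d →
      refGo files excludes keys (keys.drop j) = refGo files excludes keys (keys.drop bi) := by
    intro d
    induction d with
    | zero =>
      intro j hj hd
      obtain rfl : j = bi := by omega
      rfl
    | succ d ihd =>
      intro j hj hd
      have hjlt : j < bi := by omega
      have hjlen : j < keys.length := by omega
      rw [List.drop_eq_getElem_cons hjlen, refGo]
      have hnone : files.find? (fun f => PySem.Str.isIn keys[j] (pyBasename f) &&
          excludes.all (fun e => !PySem.Str.isIn e (pyBasename f))) = none := by
        rw [← List.getD_eq_getElem keys "" hjlen]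
        exact h2 j hjlt
      rw [hnone]
      exact ihd (j + 1) (by omega) (by omega)
  intro j hj
  rw [hskip (bi - j) j hj rfl]
  cases bo with
  | none =>
    have hlen : bi = keys.length := h3
    subst hlen
    rw [List.drop_length]
    rfl
  | some g =>
    obtain ⟨hlt, hfind⟩ := h3
    rw [List.drop_eq_getElem_cons hlt, refGo]
    have hfind' : files.find? (fun f => PySem.Str.isIn keys[bi] (pyBasename f) &&
        excludes.all (fun e => !PySem.Str.isIn e (pyBasename f))) = some g := by
      rw [← List.getD_eq_getElem keys "" hlt]
      exact hfind
    rw [hfind']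

theorem alt_eq_refGo (files keys excludes : List String) :
    search_for_key_alt files keys excludes = refGo files excludes keys keys := by
  have h0 : InvB keys excludes [] (keys.length, (none : Option String)) := by
    refine ⟨le_refl _, fun i _ => rfl, rfl⟩
  have hinv := InvB_foldl keys excludes files [] _ h0
  rw [List.nil_append] at hinv
  have := refGo_of_inv files excludes keys _ hinv 0 (Nat.zero_le _)
  rw [List.drop_zero] at this
  rw [search_for_key_alt, ← this]

theorem a_eq_refGo (files keys excludes : List String) :
    search_for_key files keys excludes = refGo files excludes keys keys := by
  rw [search_for_key]
  simp only [PySem.List.foldl_append_singleton_eq_map, List.nil_append]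
  exact searchLoopA_eq_refGo files excludes keys keys

-- ===== VERDICT (by name: the statement is the Claim_ definition above) =====
theorem search_for_key_spec : Claim_equal_search_for_key := by
  intro all_files keys excludes _
  unfold Spec_search_for_key
  rw [a_eq_refGo, alt_eq_refGo]
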